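-- pv_equiv track=rewrite | github.com/expyriment/expyriment | expyriment/design/permute.py | balanced_latin_square
-- ===== SOURCE A (Python) =====
-- from builtins import range
--
-- def _empty_square(n):
--     square = []
--     for x in range(0, n):
--         square.append([])
--         for _i in range(0, n):
--             square[x].append(None)
--     return square
--
-- def _square_of_elements(list_, idx_square):
--     """Return a square array of elements.
--
--     Returns
--     -------
--     square : list
--         a square array with the elements from the list defined by
--         idx_square e.g.; idx_square[a][b] is the list index of element[a][b].
--
--     """
--
--     square = _empty_square(len(list_))
--     for c in range(0, len(list_)):
--         for r in range(0, len(list_)):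
--             square[r][c] = list_[idx_square[r][c]]
--     return square
--
-- def _cycle_list(arr):
--     rtn = arr[1:]
--     rtn.append(arr[0])
--     return rtn
--
-- def balanced_latin_square(elements):
--     """A balanced latin square permutation of elements.
--
--     If elements is an integer the elements=[0,..., elements] is used.
--
--     Parameters
--     ----------
--     elements : int or list
--         list of elements or a number
--
--     """
--
--     if type(elements) is list:
--         idx = balanced_latin_square(len(elements))
--         square = _square_of_elements(elements, idx)
--     else:
--         n = elements
--         # Make n cycled columns [0,1,2,...n-1][1,2,3,...n-1,0][...]
--         columns = cycled_latin_square(n)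
--
--         # Make index list to sort columns [0,1,n-1,3,n-2,4,...]
--         c_idx = [0, 1]
--         take_last = True
--         tmp = list(range(2, n))
--         for _i in range(2, n):
--             if take_last:
--                 c_idx.append(tmp.pop())
--             else:
--                 c_idx.append(tmp.pop(0))
--             take_last = not take_last
--
--         # Write sorted colums to square
--         square = _empty_square(n)
--         for c in range(0, n):
--             for r in range(0, n):
--                 square[r][c] = columns[c_idx[c]][r]
--
--     return square
--
-- def cycled_latin_square(elements):
--     """A cycled latin square permutation of elements.
--
--     If elements is a integer the elements=[0,..., elements] is used.
--
--     Parameters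
--     ----------
--     elements : int or list
--         list of elements or a number
--
--     """
--
--     if type(elements) is list:
--         idx = cycled_latin_square(len(elements))
--         square = _square_of_elements(elements, idx)
--     else:
--         square = [list(range(0, elements))]
--         for r in range(0, elements - 1):
--             square.append(_cycle_list(square[r]))
--     return square
-- ===== SOURCE B (Python) =====
-- def _order(c, n):
--     if c == 0:
--         return 0
--     if c % 2 == 1:
--         return (c + 1) // 2
--     return n - c // 2
--
-- def balanced_latin_square(elements):
--     """A balanced latin square permutation of elements (closed-form construction)."""
--     if type(elements) is list:
--         n = len(elements)
--         ords = [_order(c, n) for c in range(n)]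
--         return [[elements[(r + o) % n] for o in ords] for r in range(n)]
--     n = elements
--     ords = [_order(c, n) for c in range(n)]
--     return [[(r + o) % n for o in ords] for r in range(n)]
-- ===== Notes on version B (the rewrite author's own statement) =====
-- stated objective: simpler
-- what changed: B computes every cell directly from a closed-form column-order function (modular arithmetic on the row and column index), eliminating A's cycled latin square, the pop-based column index list and the cell-by-cell rewrite of a preallocated square.
import Mathlib
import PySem

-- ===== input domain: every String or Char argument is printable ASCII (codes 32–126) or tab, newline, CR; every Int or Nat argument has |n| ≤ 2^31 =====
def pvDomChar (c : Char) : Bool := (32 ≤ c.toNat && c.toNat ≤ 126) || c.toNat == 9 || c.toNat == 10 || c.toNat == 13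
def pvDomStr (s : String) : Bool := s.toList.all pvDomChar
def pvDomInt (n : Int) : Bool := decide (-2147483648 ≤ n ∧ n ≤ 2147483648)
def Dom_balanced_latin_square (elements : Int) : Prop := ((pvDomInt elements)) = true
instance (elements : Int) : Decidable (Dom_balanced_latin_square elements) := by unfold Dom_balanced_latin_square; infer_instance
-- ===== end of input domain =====

-- B replaces A's cycled square, pop-based column index list and cell-by-cell rewrite with one
-- closed-form per-cell formula, modular arithmetic on the row index and a column-order function
-- (objective: simpler).

-- ===== PORT A =====
-- _empty_square: n×n square; 0 stands for Python's None placeholder (every cell is overwritten)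
def pv_empty_square (n : Int) : List (List Int) :=
  (PySem.List.pyRange 0 n).foldl
    (fun square _x =>
      square ++ [(PySem.List.pyRange 0 n).foldl (fun row _i => row ++ [(0 : Int)]) []])
    []

-- _cycle_list: arr[1:] + [arr[0]]; arr[0] rendered as arr.take 1 (exact: only called on nonempty rows)
def pv_cycle_list (arr : List Int) : List Int :=
  PySem.List.slice arr (some 1) none ++ arr.take 1

-- cycled_latin_square, integer branch (the only branch reachable from an Int argument)
def pv_cycled_latin_square (n : Int) : List (List Int) :=
  (PySem.List.pyRange 0 (n - 1)).foldl
    (fun square r => square ++ [pv_cycle_list (PySem.List.pyGetD square r [])])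
    [PySem.List.pyRange 0 n]

-- balanced_latin_square, integer branch: c_idx loop state is (c_idx, take_last, tmp);
-- tmp.pop() / tmp.pop(0) are getLast?/headD + dropLast/tail (tmp is nonempty at every iteration)
def balanced_latin_square (elements : Int) : List (List Int) :=
  let n := elements
  let columns := pv_cycled_latin_square n
  let st := (PySem.List.pyRange 2 n).foldl
    (fun (st : List Int × Bool × List Int) _i =>
      let c_idx := st.1
      let take_last := st.2.1
      let tmp := st.2.2
      if take_last then
        (c_idx ++ [tmp.getLast?.getD 0], !take_last, tmp.dropLast)
      else
        (c_idx ++ [tmp.headD 0], !take_last, tmp.tail))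
    ([0, 1], true, PySem.List.pyRange 2 n)
  let c_idx := st.1
  (PySem.List.pyRange 0 n).foldl
    (fun square c =>
      (PySem.List.pyRange 0 n).foldl
        (fun square r =>
          square.modify r.toNat (fun row =>
            row.set c.toNat
              (PySem.List.pyGetD (PySem.List.pyGetD columns (PySem.List.pyGetD c_idx c 0) []) r 0)))
        square)
    (pv_empty_square n)

-- ===== PORT B =====
-- _order(c, n) from Source B
def pv_order (c n : Int) : Int :=
  if c = 0 then 0
  else if PySem.Int.mod c 2 = 1 then PySem.Int.floordiv (c + 1) 2
  else n - PySem.Int.floordiv c 2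

def balanced_latin_square_alt (elements : Int) : List (List Int) :=
  let n := elements
  let ords := (PySem.List.pyRange 0 n).map (fun c => pv_order c n)
  (PySem.List.pyRange 0 n).map (fun r =>
    ords.map (fun o => PySem.Int.mod (r + o) n))

-- ===== PRECONDITION & SPEC =====
def Spec_balanced_latin_square (elements : Int) (out : List (List Int)) : Prop := out = balanced_latin_square_alt elements
instance (elements : Int) (out : List (List Int)) : Decidable (Spec_balanced_latin_square elements out) := by unfold Spec_balanced_latin_square; infer_instance

-- ===== CLAIM (what is proved, stated in full; the proofs are below) =====
def Claim_equal_balanced_latin_square : Prop := ∀ (elements : Int), Dom_balanced_latin_square elements → Spec_balanced_latin_square elements (balanced_latin_square elements)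

-- ===== LEMMAS AND PROOFS =====
def pv_rowFun (n k : Int) : List Int :=
  (List.range n.toNat).map (fun (i : Nat) => PySem.Int.mod (k + (i : Int)) n)

theorem pv_rowFun_pyRange (n k : Int) :
    pv_rowFun n k = (PySem.List.pyRange 0 n).map (fun i => PySem.Int.mod (k + i) n) := by
  rw [PySem.List.pyRange_zero, List.map_map]
  exact List.map_congr_left (fun a _ => rfl)

theorem pv_cycle_rowFun (n k : Int) (h : 0 < n) :
    pv_cycle_list (pv_rowFun n k) = pv_rowFun n (k + 1) := by
  unfold pv_cycle_list pv_rowFun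
  rw [PySem.List.slice_from _ (by norm_num), show Int.toNat 1 = 1 from rfl]
  obtain ⟨N, hN⟩ : ∃ N, n.toNat = N + 1 := ⟨n.toNat - 1, by omega⟩
  rw [hN]
  conv_lhs => rw [List.range_succ_eq_map]
  conv_rhs => rw [List.range_succ]
  rw [List.map_cons, List.drop_succ_cons, List.drop_zero, List.take_succ_cons,
    List.take_zero, List.map_map, List.map_append, List.map_singleton]
  congr 1
  · exact List.map_congr_left (fun a _ => by
      simp only [Function.comp_apply]
      congr 1
      push_cast
      ring)
  · congr 1
    have hn : (N : Int) = n - 1 := by omega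
    rw [PySem.Int.mod_eq_emod_of_pos h, PySem.Int.mod_eq_emod_of_pos h, hn,
      show k + 1 + (n - 1) = k + 0 + n by ring, Int.add_emod_right]
    norm_num

def pv_rows (n : Int) (N : Nat) : List (List Int) :=
  (List.range N).map (fun (k : Nat) => pv_rowFun n (k : Int))

theorem pv_rowFun_zero (n : Int) (h : 0 < n) : pv_rowFun n 0 = PySem.List.pyRange 0 n := by
  rw [pv_rowFun_pyRange]
  conv_rhs => rw [← List.map_id (PySem.List.pyRange 0 n)]
  apply List.map_congr_left
  intro a ha
  rw [PySem.List.mem_pyRange_one] at ha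
  rw [PySem.Int.mod_eq_emod_of_pos h, zero_add, Int.emod_eq_of_lt ha.1 ha.2]
  rfl

theorem pv_cycled_aux (n : Int) (h : 0 < n) (m : Nat) (hm : (m : Int) ≤ n - 1) :
    (PySem.List.pyRange 0 (m : Int)).foldl
      (fun square r => square ++ [pv_cycle_list (PySem.List.pyGetD square r [])])
      [PySem.List.pyRange 0 n]
    = pv_rows n (m + 1) := by
  induction m with
  | zero =>
      rw [Nat.cast_zero, PySem.List.pyRange_one_eq_nil (le_refl 0), List.foldl_nil,
        pv_rows, List.range_one, List.map_singleton, Nat.cast_zero, pv_rowFun_zero n h]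
  | succ m ih =>
      have hm' : (m : Int) ≤ n - 1 := by push_cast at hm ⊢; omega
      rw [Nat.cast_succ, PySem.List.pyRange_one_succ_right (by positivity), List.foldl_append,
        ih hm']
      simp only [List.foldl_cons, List.foldl_nil]
      have hlen : (pv_rows n (m + 1)).length = m + 1 := by simp [pv_rows]
      rw [PySem.List.pyGetD_eq_getElem _ _ (by positivity) (by rw [hlen]; push_cast; omega)]
      simp only [pv_rows, List.getElem_map, List.getElem_range]
      rw [show ((m : Int)).toNat = m from by omega]
      rw [pv_cycle_rowFun n _ h]
      rw [List.range_succ (n := m + 1), List.map_append, List.map_singleton]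
      push_cast
      ring_nf

theorem pv_cycled_eq (n : Int) (h : 0 < n) :
    pv_cycled_latin_square n = pv_rows n n.toNat := by
  unfold pv_cycled_latin_square
  have := pv_cycled_aux n h (n.toNat - 1) (by omega)
  rw [show n - 1 = ((n.toNat - 1 : Nat) : Int) by omega, this,
    show n.toNat - 1 + 1 = n.toNat by omega]

def pv_cidx_fold (n : Int) : List Int × Bool × List Int :=
  (PySem.List.pyRange 2 n).foldl
    (fun (st : List Int × Bool × List Int) _i =>
      let c_idx := st.1
      let take_last := st.2.1
      let tmp := st.2.2
      if take_last then
        (c_idx ++ [tmp.getLast?.getD 0], !take_last, tmp.dropLast)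
      else
        (c_idx ++ [tmp.headD 0], !take_last, tmp.tail))
    ([0, 1], true, PySem.List.pyRange 2 n)

def pv_orders (n : Int) (N : Nat) : List Int :=
  (List.range N).map (fun (c : Nat) => pv_order (c : Int) n)

theorem pv_order_even (n c : Int) (h0 : c ≠ 0) (he : c % 2 = 0) :
    pv_order c n = n - c / 2 := by
  rw [pv_order, if_neg h0, PySem.Int.mod_eq_emod_of_pos (by norm_num), he,
    if_neg (by norm_num), PySem.Int.floordiv_eq_ediv_of_pos (by norm_num)]

theorem pv_order_odd (n c : Int) (ho : c % 2 = 1) :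
    pv_order c n = (c + 1) / 2 := by
  rw [pv_order, if_neg (by omega), PySem.Int.mod_eq_emod_of_pos (by norm_num), ho,
    if_pos rfl, PySem.Int.floordiv_eq_ediv_of_pos (by norm_num)]

theorem pv_cidx_aux (n : Int) (m : Nat) (hm : (m : Int) + 2 ≤ n) :
    (PySem.List.pyRange 2 ((m : Int) + 2)).foldl
      (fun (st : List Int × Bool × List Int) _i =>
        let c_idx := st.1
        let take_last := st.2.1
        let tmp := st.2.2
        if take_last then
          (c_idx ++ [tmp.getLast?.getD 0], !take_last, tmp.dropLast)
        else
          (c_idx ++ [tmp.headD 0], !take_last, tmp.tail))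
      ([0, 1], true, PySem.List.pyRange 2 n)
    = (pv_orders n (m + 2), decide (m % 2 = 0),
       PySem.List.pyRange (2 + ((m / 2 : Nat) : Int)) (n - (((m + 1) / 2 : Nat) : Int))) := by
  induction m with
  | zero =>
      rw [show ((0:Nat):Int) + 2 = 2 by norm_num, PySem.List.pyRange_one_eq_nil (le_refl 2),
        List.foldl_nil]
      have : pv_orders n 2 = [0, 1] := by
        rw [pv_orders]
        rw [show List.range 2 = [0, 1] from rfl]
        simp only [List.map_cons, List.map_nil, Nat.cast_zero, Nat.cast_one]
        rw [show pv_order 0 n = 0 from rfl, pv_order_odd n 1 (by norm_num)]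
        norm_num
      rw [this]
      norm_num
  | succ m ih =>
      have ihh := ih (by push_cast at hm ⊢; omega)
      rw [show ((m+1:Nat):Int) + 2 = ((m:Int) + 2) + 1 by push_cast; ring,
        PySem.List.pyRange_one_succ_right (by omega), List.foldl_append, ihh,
        List.foldl_cons, List.foldl_nil]
      have hab : 2 + ((m / 2 : Nat) : Int) < n - (((m + 1) / 2 : Nat) : Int) := by
        push_cast at hm ⊢; omega
      rcases Nat.mod_two_eq_zero_or_one m with hpar | hpar
      · -- take_last = true : pop from the back
        have hsplit : PySem.List.pyRange (2 + ((m / 2 : Nat) : Int)) (n - (((m + 1) / 2 : Nat) : Int))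
            = PySem.List.pyRange (2 + ((m / 2 : Nat) : Int)) (n - (((m + 1) / 2 : Nat) : Int) - 1)
              ++ [n - (((m + 1) / 2 : Nat) : Int) - 1] := by
          have := PySem.List.pyRange_one_succ_right
            (a := 2 + ((m / 2 : Nat) : Int)) (b := n - (((m + 1) / 2 : Nat) : Int) - 1) (by omega)
          rw [show n - (((m + 1) / 2 : Nat) : Int) - 1 + 1 = n - (((m + 1) / 2 : Nat) : Int) by ring] at this
          exact this
        simp only [hpar, if_pos, decide_true, Bool.not_true]
        rw [hsplit, List.getLast?_concat, List.dropLast_concat]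
        refine Prod.ext ?_ (Prod.ext ?_ ?_)
        · show pv_orders n (m + 2) ++ [(n - (((m + 1) / 2 : Nat) : Int) - 1)] = pv_orders n (m + 1 + 2)
          have hsp : pv_orders n (m + 1 + 2) = pv_orders n (m + 2) ++ [pv_order ((m + 2 : Nat) : Int) n] := by
            unfold pv_orders
            rw [show m + 1 + 2 = (m + 2) + 1 from rfl, List.range_succ, List.map_append,
              List.map_singleton]
          rw [hsp]
          congr 1
          rw [pv_order_even n (((m + 2 : Nat)) : Int) (by push_cast; omega) (by push_cast; omega)]
          congr 1
          push_cast
          omega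
        · show (false : Bool) = decide ((m + 1) % 2 = 0)
          have : (m + 1) % 2 = 1 := by omega
          simp [this]
        · show PySem.List.pyRange (2 + ((m / 2 : Nat) : Int)) (n - (((m + 1) / 2 : Nat) : Int) - 1)
            = PySem.List.pyRange (2 + (((m + 1) / 2 : Nat) : Int)) (n - (((m + 1 + 1) / 2 : Nat) : Int))
          congr 1 <;> push_cast <;> omega
      · -- take_last = false : pop from the front
        have hcons := PySem.List.pyRange_one_cons hab
        simp only [hpar, Nat.one_ne_zero, decide_false, Bool.false_eq_true, if_false,
          Bool.not_false]
        rw [hcons, List.headD_cons, List.tail_cons]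
        refine Prod.ext ?_ (Prod.ext ?_ ?_)
        · show pv_orders n (m + 2) ++ [2 + ((m / 2 : Nat) : Int)] = pv_orders n (m + 1 + 2)
          have hsp : pv_orders n (m + 1 + 2) = pv_orders n (m + 2) ++ [pv_order ((m + 2 : Nat) : Int) n] := by
            unfold pv_orders
            rw [show m + 1 + 2 = (m + 2) + 1 from rfl, List.range_succ, List.map_append,
              List.map_singleton]
          rw [hsp]
          congr 1
          rw [pv_order_odd n (((m + 2 : Nat)) : Int) (by push_cast; omega)]
          congr 1
          push_cast
          omega
        · show (true : Bool) = decide ((m + 1) % 2 = 0)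
          have : (m + 1) % 2 = 0 := by omega
          simp [this]
        · show PySem.List.pyRange (2 + ((m / 2 : Nat) : Int) + 1) (n - (((m + 1) / 2 : Nat) : Int))
            = PySem.List.pyRange (2 + (((m + 1) / 2 : Nat) : Int)) (n - (((m + 1 + 1) / 2 : Nat) : Int))
          congr 1 <;> push_cast <;> omega

theorem pv_cidx_fold_fst (n : Int) (h2 : 2 ≤ n) :
    (pv_cidx_fold n).1 = pv_orders n n.toNat := by
  unfold pv_cidx_fold
  have haux := pv_cidx_aux n (n.toNat - 2) (by omega)
  rw [show ((n.toNat - 2 : Nat) : Int) + 2 = n by omega,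
    show n.toNat - 2 + 2 = n.toNat by omega] at haux
  rw [haux]

theorem pv_cidx_val (n c : Int) (h : 0 < n) (hc : 0 ≤ c) (hcn : c < n) :
    PySem.List.pyGetD (pv_cidx_fold n).1 c 0 = pv_order c n := by
  by_cases h2 : 2 ≤ n
  · rw [pv_cidx_fold_fst n h2]
    have hlen : (pv_orders n n.toNat).length = n.toNat := by simp [pv_orders]
    rw [PySem.List.pyGetD_eq_getElem _ _ hc (by rw [hlen]; omega)]
    unfold pv_orders
    rw [List.getElem_map, List.getElem_range]
    congr 1
    omega
  · -- n = 1 : the loop body never runs, c_idx = [0, 1] and c = 0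
    have hn1 : n = 1 := by omega
    have hc0 : c = 0 := by omega
    subst hn1 hc0
    unfold pv_cidx_fold
    rw [PySem.List.pyRange_one_eq_nil (by norm_num), List.foldl_nil]
    rw [show (([0, 1], true, PySem.List.pyRange 2 1) : List Int × Bool × List Int).1
        = [0, 1] from rfl]
    rw [PySem.List.pyGetD_eq_getElem _ _ (le_refl 0) (by norm_num)]
    rfl

theorem pv_order_bounds (n c : Int) (hc : 0 ≤ c) (hcn : c < n) :
    0 ≤ pv_order c n ∧ pv_order c n < n := by
  unfold pv_order
  split_ifs with h0 h1
  · omega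
  · rw [PySem.Int.floordiv_eq_ediv_of_pos (by norm_num)]
    omega
  · rw [PySem.Int.mod_eq_emod_of_pos (by norm_num)] at h1
    rw [PySem.Int.floordiv_eq_ediv_of_pos (by norm_num)]
    omega

theorem pv_empty_square_eq (n : Int) :
    pv_empty_square n = List.replicate n.toNat (List.replicate n.toNat 0) := by
  unfold pv_empty_square
  rw [PySem.List.foldl_append_singleton_eq_map
    (f := fun (_x : Int) => (PySem.List.pyRange 0 n).foldl (fun row _i => row ++ [(0 : Int)]) []),
    PySem.List.foldl_append_singleton_eq_map (f := fun (_i : Int) => (0 : Int))]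
  simp only [List.nil_append, List.map_const', PySem.List.length_pyRange_one]
  norm_num

theorem pv_colpass (w : Int → Int) (cN : Nat) (sq : List (List Int)) (m : Nat) :
    (PySem.List.pyRange 0 (m : Int)).foldl
      (fun sq r => sq.modify r.toNat (fun row => row.set cN (w r))) sq
    = sq.mapIdx (fun r row => if r < m then row.set cN (w (r : Int)) else row) := by
  induction m with
  | zero =>
      rw [Nat.cast_zero, PySem.List.pyRange_one_eq_nil (le_refl 0), List.foldl_nil]
      apply List.ext_getElem
      · simp
      · intro j h1 h2
        simp [List.getElem_mapIdx]
  | succ m ih =>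
      rw [Nat.cast_succ, PySem.List.pyRange_one_succ_right (by positivity), List.foldl_append,
        ih, List.foldl_cons, List.foldl_nil]
      apply List.ext_getElem
      · simp
      · intro j h1 h2
        rw [List.getElem_modify]
        simp only [List.getElem_mapIdx, Int.toNat_natCast]
        by_cases hj : j < m
        · rw [if_neg (by omega), if_pos hj, if_pos (by omega)]
        · by_cases hjm : j = m
          · subst hjm
            rw [if_pos rfl, if_neg (by omega), if_pos (by omega)]
          · rw [if_neg (by omega), if_neg (by omega), if_neg (by omega)]

theorem pv_writeloop (v : Int → Int → Int) (n : Int) (h : 0 < n) (M : Nat) :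
    (PySem.List.pyRange 0 (M : Int)).foldl
      (fun sq c => (PySem.List.pyRange 0 n).foldl
        (fun sq r => sq.modify r.toNat (fun row => row.set c.toNat (v r c))) sq)
      (List.replicate n.toNat (List.replicate n.toNat 0))
    = (List.range n.toNat).map (fun (r : Nat) =>
        (List.range n.toNat).map (fun (c : Nat) => if c < M then v (r : Int) (c : Int) else 0)) := by
  induction M with
  | zero =>
      rw [Nat.cast_zero, PySem.List.pyRange_one_eq_nil (le_refl 0), List.foldl_nil]
      apply List.ext_getElem
      · simp
      · intro j h1 h2
        simp only [List.getElem_replicate, List.getElem_map, List.getElem_range]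
        apply List.ext_getElem
        · simp
        · intro i g1 g2
          simp
  | succ M ih =>
      rw [Nat.cast_succ, PySem.List.pyRange_one_succ_right (by positivity), List.foldl_append,
        ih, List.foldl_cons, List.foldl_nil]
      have hcp := pv_colpass (fun r => v r ((M : Nat) : Int)) (((M : Nat) : Int)).toNat
        ((List.range n.toNat).map (fun (r : Nat) =>
          (List.range n.toNat).map (fun (c : Nat) => if c < M then v (r : Int) (c : Int) else 0)))
        n.toNat
      rw [show ((n.toNat : Nat) : Int) = n by omega] at hcp
      rw [hcp]
      apply List.ext_getElem
      · simp
      · intro j h1 h2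
        simp only [List.getElem_mapIdx, Int.toNat_natCast, List.getElem_map, List.getElem_range,
          List.length_map, List.length_range] at h1 h2 ⊢
        rw [if_pos (by omega)]
        apply List.ext_getElem
        · simp
        · intro i g1 g2
          simp only [List.length_map, List.length_range, List.length_set] at g1 g2
          rw [List.getElem_set]
          simp only [List.getElem_map, List.getElem_range]
          by_cases hiM : i = M
          · subst hiM
            rw [if_pos rfl, if_pos (by omega)]
          · rw [if_neg (fun hh => hiM hh.symm)]
            by_cases hlt : i < M
            · rw [if_pos hlt, if_pos (by omega)]
            · rw [if_neg hlt, if_neg (by omega)]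

theorem pv_alt_eq (n : Int) : balanced_latin_square_alt n
    = (PySem.List.pyRange 0 n).map (fun r => (PySem.List.pyRange 0 n).map
        (fun c => PySem.Int.mod (r + pv_order c n) n)) := by
  show (PySem.List.pyRange 0 n).map
      (fun r => ((PySem.List.pyRange 0 n).map (fun c => pv_order c n)).map
        (fun o => PySem.Int.mod (r + o) n)) = _
  simp only [List.map_map]
  rfl

theorem pv_main (n : Int) : balanced_latin_square n = balanced_latin_square_alt n := by
  rw [pv_alt_eq]
  by_cases h : 0 < n
  · show (PySem.List.pyRange 0 n).foldl
        (fun square c => (PySem.List.pyRange 0 n).foldl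
          (fun square r => square.modify r.toNat (fun row => row.set c.toNat
            (PySem.List.pyGetD (PySem.List.pyGetD (pv_cycled_latin_square n)
              (PySem.List.pyGetD (pv_cidx_fold n).1 c 0) []) r 0))) square)
        (pv_empty_square n)
      = (PySem.List.pyRange 0 n).map (fun r => (PySem.List.pyRange 0 n).map
          (fun c => PySem.Int.mod (r + pv_order c n) n))
    rw [pv_empty_square_eq]
    have hw := pv_writeloop (fun r c => PySem.List.pyGetD (PySem.List.pyGetD
      (pv_cycled_latin_square n) (PySem.List.pyGetD (pv_cidx_fold n).1 c 0) []) r 0) n h n.toNat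
    rw [show ((n.toNat : Nat) : Int) = n by omega] at hw
    rw [hw]
    rw [PySem.List.pyRange_zero, List.map_map]
    apply List.map_congr_left
    intro r hr
    rw [List.mem_range] at hr
    simp only [Function.comp_apply]
    rw [List.map_map]
    apply List.map_congr_left
    intro c hc
    rw [List.mem_range] at hc
    simp only [Function.comp_apply]
    rw [if_pos hc]
    have hcv := pv_cidx_val n (c : Int) h (by positivity) (by omega)
    rw [hcv]
    obtain ⟨hq0, hqn⟩ := pv_order_bounds n (c : Int) (by positivity) (by omega)
    rw [pv_cycled_eq n h]
    have hlen1 : (pv_rows n n.toNat).length = n.toNat := by simp [pv_rows]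
    rw [PySem.List.pyGetD_eq_getElem _ _ hq0 (by rw [hlen1]; omega)]
    unfold pv_rows
    rw [List.getElem_map, List.getElem_range]
    rw [show ((((pv_order (c : Int) n).toNat : Nat)) : Int) = pv_order (c : Int) n by omega]
    have hlen2 : (pv_rowFun n (pv_order (c : Int) n)).length = n.toNat := by simp [pv_rowFun]
    rw [PySem.List.pyGetD_eq_getElem _ _ (by positivity) (by rw [hlen2]; omega)]
    unfold pv_rowFun
    rw [List.getElem_map, List.getElem_range, Int.toNat_natCast]
    congr 1
    ring
  · show (PySem.List.pyRange 0 n).foldl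
        (fun square c => (PySem.List.pyRange 0 n).foldl
          (fun square r => square.modify r.toNat (fun row => row.set c.toNat
            (PySem.List.pyGetD (PySem.List.pyGetD (pv_cycled_latin_square n)
              (PySem.List.pyGetD (pv_cidx_fold n).1 c 0) []) r 0))) square)
        (pv_empty_square n)
      = (PySem.List.pyRange 0 n).map (fun r => (PySem.List.pyRange 0 n).map
          (fun c => PySem.Int.mod (r + pv_order c n) n))
    rw [PySem.List.pyRange_one_eq_nil (by omega), List.foldl_nil, List.map_nil]
    unfold pv_empty_square
    rw [PySem.List.pyRange_one_eq_nil (by omega), List.foldl_nil]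

-- ===== VERDICT (by name: the statement is the Claim_ definition above) =====
theorem balanced_latin_square_spec : Claim_equal_balanced_latin_square := by
  intro elements _
  unfold Spec_balanced_latin_square
  exact pv_main elements
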